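-- pv_equiv track=rewrite | github.com/Dav1com/CC3101-trabajo-1 | main.py | genValuacion
-- ===== SOURCE A (Python) =====
-- def genValuacion(compresion, numVars, evaluacion):
--     arr = [None] * numVars
--     for i in range(numVars):
--         if i+1 in compresion:
--             arr[i] = not not((evaluacion >> compresion[i+1]) & 1)
--         else:
--             arr[i] = False
--     return arr
-- ===== SOURCE B (Python) =====
-- def genValuacion(compresion, numVars, evaluacion):
--     # Scatter over the map's entries instead of scanning every index with a
--     # membership test: untouched positions keep their False default.
--     arr = [False] * numVars
--     for key, shift in compresion.items():
--         idx = key - 1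
--         if 0 <= idx < numVars:
--             arr[idx] = bool((evaluacion >> shift) & 1)
--     return arr
-- ===== Notes on version B (the rewrite author's own statement) =====
-- stated objective: alternative
-- what changed: Replaced the gather loop over range(numVars) with per-index dict membership tests by a single scatter over compresion.items() into a [False]*numVars array; Pre_ excludes the ValueError case (a key in [1,numVars] mapped to a negative shift, where both programs raise) and duplicate keys in the association-list encoding, which cannot arise from a real Python dict.
import Mathlib
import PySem

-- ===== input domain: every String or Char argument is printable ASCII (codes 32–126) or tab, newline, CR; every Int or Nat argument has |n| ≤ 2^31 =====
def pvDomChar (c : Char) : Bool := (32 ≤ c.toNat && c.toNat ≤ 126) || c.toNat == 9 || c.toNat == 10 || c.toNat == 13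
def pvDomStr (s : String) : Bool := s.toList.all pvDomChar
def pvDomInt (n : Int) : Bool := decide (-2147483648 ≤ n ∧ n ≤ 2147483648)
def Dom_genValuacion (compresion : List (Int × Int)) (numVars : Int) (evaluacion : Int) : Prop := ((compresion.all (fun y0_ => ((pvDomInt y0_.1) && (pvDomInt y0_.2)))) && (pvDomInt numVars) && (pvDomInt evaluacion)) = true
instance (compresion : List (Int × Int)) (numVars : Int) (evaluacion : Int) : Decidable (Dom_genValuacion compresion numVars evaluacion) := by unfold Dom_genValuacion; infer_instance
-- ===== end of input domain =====

-- B replaces A's gather loop over range(numVars) (dict membership test at every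
-- index) by one scatter pass over the dict's entries into a [False]*numVars
-- array; same return value on Pre_.

-- bool((evaluacion >> shift) & 1): both Pythons compute this same expression.
def pvBit (evaluacion shift : Int) : Bool := decide (PySem.Int.band (evaluacion >>> shift.toNat) 1 ≠ 0)

-- ===== PORT A =====
-- arr = [None]*numVars; for i in range(numVars): membership test + dict lookup.
def genValuacion (compresion : List (Int × Int)) (numVars : Int) (evaluacion : Int) : List Bool :=
  (PySem.List.pyRange 0 numVars 1).map (fun i =>
    match compresion.lookup (i + 1) with
    | some s => pvBit evaluacion s
    | none => false)

-- ===== PORT B =====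
-- arr = [False]*numVars; scatter each (key, shift) entry into arr.
def genValuacion_alt (compresion : List (Int × Int)) (numVars : Int) (evaluacion : Int) : List Bool :=
  compresion.foldl (fun arr p =>
      let idx := p.1 - 1
      if 0 ≤ idx ∧ idx < numVars then arr.set idx.toNat (pvBit evaluacion p.2) else arr)
    (List.replicate numVars.toNat false)

-- ===== PRECONDITION & SPEC =====
-- Pre_ excludes (a) entries with a key in [1, numVars] mapped to a negative
-- shift, where Python A raises ValueError on 'evaluacion >> shift' (B raises
-- there too), and (b) duplicate keys in the association-list encoding, which a
-- real Python dict argument can never produce (A's first-match vs B's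
-- last-write order there is an artefact of the encoding, not of either Python).
def Pre_genValuacion (compresion : List (Int × Int)) (numVars : Int) (evaluacion : Int) : Prop :=
  (compresion.map Prod.fst).Nodup ∧
    ∀ p ∈ compresion, 1 ≤ p.1 → p.1 ≤ numVars → 0 ≤ p.2
instance (compresion : List (Int × Int)) (numVars : Int) (evaluacion : Int) : Decidable (Pre_genValuacion compresion numVars evaluacion) := by unfold Pre_genValuacion; infer_instance
def pvWitness_genValuacion : (List (Int × Int)) × Int × Int := ([(1, 0), (3, 2)], 3, 5)

def Spec_genValuacion (compresion : List (Int × Int)) (numVars : Int) (evaluacion : Int) (out : List Bool) : Prop := out = genValuacion_alt compresion numVars evaluacion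
instance (compresion : List (Int × Int)) (numVars : Int) (evaluacion : Int) (out : List Bool) : Decidable (Spec_genValuacion compresion numVars evaluacion out) := by unfold Spec_genValuacion; infer_instance

-- ===== CLAIM (what is proved, stated in full; the proofs are below) =====
def Claim_equal_genValuacion : Prop := ∀ (compresion : List (Int × Int)) (numVars : Int) (evaluacion : Int), Dom_genValuacion compresion numVars evaluacion → Pre_genValuacion compresion numVars evaluacion → Spec_genValuacion compresion numVars evaluacion (genValuacion compresion numVars evaluacion)

-- ===== LEMMAS AND PROOFS =====

theorem pvWitness_ok : Dom_genValuacion pvWitness_genValuacion.1 pvWitness_genValuacion.2.1 pvWitness_genValuacion.2.2 ∧ Pre_genValuacion pvWitness_genValuacion.1 pvWitness_genValuacion.2.1 pvWitness_genValuacion.2.2 := by decide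

theorem lookup_eq_none_of_not_mem (l : List (Int × Int)) (k : Int)
    (h : k ∉ l.map Prod.fst) : l.lookup k = none := by
  induction l with
  | nil => rfl
  | cons p rest ih =>
    simp only [List.map_cons, List.mem_cons, not_or] at h
    have hbeq : (k == p.1) = false := beq_eq_false_iff_ne.mpr h.1
    simp [List.lookup, hbeq, ih h.2]

theorem scatter_length (numVars evaluacion : Int) :
    ∀ (l : List (Int × Int)) (acc : List Bool),
      (l.foldl (fun arr (p : Int × Int) =>
          let idx := p.1 - 1
          if 0 ≤ idx ∧ idx < numVars then arr.set idx.toNat (pvBit evaluacion p.2) else arr)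
        acc).length = acc.length := by
  intro l
  induction l with
  | nil => intro acc; rfl
  | cons p rest ih =>
    intro acc
    rw [List.foldl_cons, ih]
    dsimp only
    split <;> simp

theorem scatter_getD (numVars evaluacion : Int) :
    ∀ (l : List (Int × Int)) (acc : List Bool),
      (l.map Prod.fst).Nodup → acc.length = numVars.toNat →
      ∀ i : Nat, i < acc.length →
        (l.foldl (fun arr (p : Int × Int) =>
            let idx := p.1 - 1
            if 0 ≤ idx ∧ idx < numVars then arr.set idx.toNat (pvBit evaluacion p.2) else arr)
          acc).getD i false =
        (match l.lookup ((i : Int) + 1) with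
         | some s => pvBit evaluacion s
         | none => acc.getD i false) := by
  intro l
  induction l with
  | nil => intro acc _ _ i _; rfl
  | cons p rest ih =>
    intro acc hn hlen i hi
    simp only [List.map_cons, List.nodup_cons] at hn
    rw [List.foldl_cons]
    by_cases hk : p.1 = (i : Int) + 1
    · -- this entry targets index i; nodup ⇒ the rest never touches key i+1 again
      have hbeq : (((i : Int) + 1) == p.1) = true := by simp [hk]
      have hnv : i < numVars.toNat := hlen ▸ hi
      have hguard : 0 ≤ p.1 - 1 ∧ p.1 - 1 < numVars := by
        have : (i : Int) < (numVars.toNat : Int) := by exact_mod_cast hnv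
        omega
      have hrest : rest.lookup ((i : Int) + 1) = none :=
        lookup_eq_none_of_not_mem rest _ (hk ▸ hn.1)
      have hstep : (let idx := p.1 - 1
            if 0 ≤ idx ∧ idx < numVars then acc.set idx.toNat (pvBit evaluacion p.2) else acc)
          = acc.set (p.1 - 1).toNat (pvBit evaluacion p.2) := by
        dsimp only; rw [if_pos hguard]
      rw [hstep, ih _ hn.2 (by simpa using hlen) i (by simpa using hi), hrest]
      simp only [List.lookup, hbeq]
      have hidx : (p.1 - 1).toNat = i := by omega
      rw [hidx]
      simp [List.getD, hi]
    · -- a different key: index i is untouched by this entry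
      have hbeq : (((i : Int) + 1) == p.1) = false :=
        beq_eq_false_iff_ne.mpr (fun h => hk h.symm)
      have hlen' : (let idx := p.1 - 1
            if 0 ≤ idx ∧ idx < numVars then acc.set idx.toNat (pvBit evaluacion p.2) else acc).length
          = numVars.toNat := by
        dsimp only; split <;> simpa using hlen
      have hacc : (let idx := p.1 - 1
            if 0 ≤ idx ∧ idx < numVars then acc.set idx.toNat (pvBit evaluacion p.2) else acc).getD i false
          = acc.getD i false := by
        dsimp only
        split
        · next hg =>
          have hne : (p.1 - 1).toNat ≠ i := by omega
          simp only [List.getD]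
          rw [List.getElem?_set_ne hne]
        · rfl
      rw [ih _ hn.2 hlen' i (by rw [hlen']; exact hlen ▸ hi)]
      simp only [List.lookup, hbeq]
      cases hrl : rest.lookup ((i : Int) + 1) with
      | some s => rfl
      | none => exact hacc

theorem genValuacion_length (compresion : List (Int × Int)) (numVars evaluacion : Int) :
    (genValuacion compresion numVars evaluacion).length = numVars.toNat := by
  simp [genValuacion, PySem.List.length_pyRange_one]

theorem genValuacion_alt_length (compresion : List (Int × Int)) (numVars evaluacion : Int) :
    (genValuacion_alt compresion numVars evaluacion).length = numVars.toNat := by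
  unfold genValuacion_alt
  rw [scatter_length]
  simp

-- ===== VERDICT (by name: the statement is the Claim_ definition above) =====
theorem genValuacion_spec : Claim_equal_genValuacion := by
  intro compresion numVars evaluacion _ hpre
  unfold Spec_genValuacion
  apply List.ext_getElem
  · rw [genValuacion_length, genValuacion_alt_length]
  · intro i h1 h2
    have hi : i < numVars.toNat := by
      rw [← genValuacion_length compresion numVars evaluacion]; exact h1
    have hB : (genValuacion_alt compresion numVars evaluacion).getD i false =
        (match compresion.lookup ((i : Int) + 1) with
         | some s => pvBit evaluacion s
         | none => false) := by
      unfold genValuacion_alt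
      rw [scatter_getD numVars evaluacion compresion _ hpre.1 (by simp) i (by simpa using hi)]
      cases compresion.lookup ((i : Int) + 1) with
      | some s => rfl
      | none => simp [List.getD, hi]
    have hA : (genValuacion compresion numVars evaluacion)[i] =
        (match compresion.lookup ((i : Int) + 1) with
         | some s => pvBit evaluacion s
         | none => false) := by
      unfold genValuacion
      rw [List.getElem_map, PySem.List.getElem_pyRange_one]
      simp
    rw [hA, ← hB, List.getD_eq_getElem _ _ h2]
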